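-- pv_equiv track=rewrite | github.com/trishabhogawar/MIMIC-IV-Explainable-Neuro-Symbolic-Reasoner | neuro_symbolic_reasoner.py | _resolve_concept_to_model_name
-- ===== SOURCE A (Python) =====
-- from typing import List, Dict, Any, Tuple
--
-- def _resolve_concept_to_model_name(names: List[str], concept: str):
--     """
--     Allow short/semantic targets like 'mbp__mean' or 'lactate__mean'.
--     Prefer score__* over tab__* if both exist; else fallback to suffix match.
--     Returns the resolved model column name or None.
--     """
--     c = concept.lower()
--     low = [n.lower() for n in names]
--     for p in [f"score__{c}", f"tab__{c}"]:
--         for n, nl in zip(names, low):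
--             if nl == p:
--                 return n
--     cand = [n for n, nl in zip(names, low) if nl.endswith(c)]
--     return cand[0] if cand else None
-- ===== SOURCE B (Python) =====
-- def _resolve_concept_to_model_name(names, concept):
--     """Single pass: return first exact score__ match immediately; remember the
--     first tab__ match and the first suffix match; pick by priority at the end."""
--     c = concept.lower()
--     sp = "score__" + c
--     tp = "tab__" + c
--     tab = None
--     suf = None
--     for n in names:
--         nl = n.lower()
--         if nl == sp:
--             return n
--         if tab is None and nl == tp:
--             tab = n
--         if suf is None and nl.endswith(c):
--             suf = n
--     return tab if tab is not None else suf
-- ===== Notes on version B (the rewrite author's own statement) =====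
-- stated objective: alternative
-- what changed: Replaces A's three separate scans (one per pattern, then a full filter building a candidate list) by a single left-to-right pass that returns the first score__ match immediately and remembers the first tab__ and first suffix matches, choosing by priority at the end.
import Mathlib
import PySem

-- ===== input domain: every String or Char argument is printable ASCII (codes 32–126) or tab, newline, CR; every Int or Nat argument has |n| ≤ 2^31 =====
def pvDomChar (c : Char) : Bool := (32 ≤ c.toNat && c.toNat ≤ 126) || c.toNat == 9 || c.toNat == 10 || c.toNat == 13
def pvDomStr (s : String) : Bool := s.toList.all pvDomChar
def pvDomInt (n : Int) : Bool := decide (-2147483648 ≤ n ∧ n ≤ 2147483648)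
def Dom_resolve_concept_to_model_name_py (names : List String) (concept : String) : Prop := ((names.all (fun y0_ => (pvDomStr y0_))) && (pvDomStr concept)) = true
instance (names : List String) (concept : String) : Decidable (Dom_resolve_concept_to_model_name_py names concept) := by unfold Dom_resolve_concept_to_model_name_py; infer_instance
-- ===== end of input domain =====

-- B replaces A's three sequential scans by one pass remembering first matches per priority; same results, fewer traversals.

-- ===== PORT A =====
-- first n in the zipped list whose lowercase equals p (A's inner 'for n, nl in zip(names, low)')
def pvFindEq : List (String × String) → String → Option String
  | [], _ => none
  | (n, nl) :: rest, p => if nl == p then some n else pvFindEq rest p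

-- A's list comprehension [n for n, nl in zip(names, low) if nl.endswith(c)]
def pvCand : List (String × String) → String → List String
  | [], _ => []
  | (n, nl) :: rest, c =>
      if PySem.Str.endswith nl c then n :: pvCand rest c else pvCand rest c

def resolve_concept_to_model_name_py (names : List String) (concept : String) : Option String :=
  let c := PySem.Str.lower concept
  let low := names.map PySem.Str.lower
  let z := names.zip low
  match pvFindEq z ("score__" ++ c) with
  | some n => some n
  | none =>
    match pvFindEq z ("tab__" ++ c) with
    | some n => some n
    | none =>
      let cand := pvCand z c
      cand.head?

-- ===== PORT B =====
-- B's single loop: return on score match, remember first tab__ and suffix matches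
def pvScan : List String → String → String → String → Option String → Option String → Option String
  | [], _, _, _, tab, suf => if tab.isSome then tab else suf
  | n :: rest, sp, tp, c, tab, suf =>
    let nl := PySem.Str.lower n
    if nl == sp then some n
    else
      pvScan rest sp tp c
        (if tab.isNone && (nl == tp) then some n else tab)
        (if suf.isNone && PySem.Str.endswith nl c then some n else suf)

def resolve_concept_to_model_name_py_alt (names : List String) (concept : String) : Option String :=
  let c := PySem.Str.lower concept
  pvScan names ("score__" ++ c) ("tab__" ++ c) c none none

-- ===== PRECONDITION & SPEC =====
def Spec_resolve_concept_to_model_name_py (names : List String) (concept : String) (out : Option String) : Prop := out = resolve_concept_to_model_name_py_alt names concept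
instance (names : List String) (concept : String) (out : Option String) : Decidable (Spec_resolve_concept_to_model_name_py names concept out) := by unfold Spec_resolve_concept_to_model_name_py; infer_instance

-- ===== CLAIM (what is proved, stated in full; the proofs are below) =====
def Claim_equal_resolve_concept_to_model_name_py : Prop := ∀ (names : List String) (concept : String), Dom_resolve_concept_to_model_name_py names concept → Spec_resolve_concept_to_model_name_py names concept (resolve_concept_to_model_name_py names concept)

-- ===== LEMMAS AND PROOFS =====

-- B's scan, for arbitrary accumulators, computes A's prioritised selection.
theorem pvScan_eq (ns : List String) (sp tp c : String) (tab suf : Option String) :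
    pvScan ns sp tp c tab suf =
      (let z := ns.zip (ns.map PySem.Str.lower)
       match pvFindEq z sp with
       | some n => some n
       | none =>
         match (if tab.isSome then tab else pvFindEq z tp) with
         | some t => some t
         | none => if suf.isSome then suf else (pvCand z c).head?) := by
  induction ns generalizing tab suf with
  | nil => cases tab <;> cases suf <;> simp [pvScan, pvFindEq, pvCand]
  | cons n rest ih =>
    simp only [List.map_cons, List.zip_cons_cons]
    by_cases hsp : (PySem.Str.lower n == sp) = true
    · simp [pvScan, pvFindEq, hsp]
    · simp only [pvScan, pvFindEq, pvCand, hsp, if_false, Bool.false_eq_true]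
      rw [ih]
      by_cases htp : (PySem.Str.lower n == tp) = true <;>
        by_cases hsuf : PySem.Chars.endswith (PySem.Chars.lower n.toList) c.toList = true <;>
        cases tab <;> cases suf <;>
        simp [htp, hsuf]

-- ===== VERDICT (by name: the statement is the Claim_ definition above) =====
theorem resolve_concept_to_model_name_py_spec : Claim_equal_resolve_concept_to_model_name_py := by
  intro names concept _
  unfold Spec_resolve_concept_to_model_name_py resolve_concept_to_model_name_py
    resolve_concept_to_model_name_py_alt
  rw [pvScan_eq]
  simp
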